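-- pv_equiv track=rewrite | github.com/Rishabhjain-1509/Python | Code Chef/August_Challenge/Chef and Linear Chess.py | Chefs_pawn
-- ===== SOURCE A (Python) =====
-- def Chefs_pawn(P,N):
--     Dis = {}
--     for i in N:
--         if(P%i == 0):
--             count = 0
--             Sum = 0
--             while(Sum != P):
--                 Sum = Sum + i
--                 count = count + 1
--
--             Dis[i] = count
--
--     if(len(Dis) != 0):
--         Max = min(Dis, key=Dis.get)
--     else:
--         Max = -1
--
--     return (Max)
-- ===== SOURCE B (Python) =====
-- def Chefs_pawn(P, N):
--     # single pass: running best (divisor, quotient); strict < keeps the earliest minimum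
--     best_i = -1
--     best_q = None
--     for i in N:
--         if P % i == 0:
--             q = P // i
--             if best_q is None or q < best_q:
--                 best_i, best_q = i, q
--     return best_i
-- ===== Notes on version B (the rewrite author's own statement) =====
-- stated objective: simpler
-- what changed: Replaces A's build-a-dict-of-counts (each count obtained by a repeated-addition while loop) followed by a min-over-dict reduction with a single accumulator pass that computes each quotient by integer division and keeps a running first-minimum.
import Mathlib
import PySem

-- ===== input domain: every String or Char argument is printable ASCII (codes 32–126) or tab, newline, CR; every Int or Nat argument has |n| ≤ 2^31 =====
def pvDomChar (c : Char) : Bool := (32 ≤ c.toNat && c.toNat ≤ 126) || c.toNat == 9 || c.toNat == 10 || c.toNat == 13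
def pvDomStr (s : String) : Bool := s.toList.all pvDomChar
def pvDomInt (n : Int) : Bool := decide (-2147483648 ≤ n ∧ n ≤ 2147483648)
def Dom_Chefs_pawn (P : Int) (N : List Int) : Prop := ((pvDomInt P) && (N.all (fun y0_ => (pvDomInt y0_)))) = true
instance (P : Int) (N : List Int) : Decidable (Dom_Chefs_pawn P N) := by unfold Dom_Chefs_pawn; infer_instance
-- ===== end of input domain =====

-- B replaces A's dict-of-counts (counts by repeated addition) plus min-over-dict with one
-- running-first-minimum pass using integer division: simpler, same results on Pre_.

-- ===== PORT A =====
-- the inner 'while Sum != P' loop; fuel |P|+1 suffices on every input where the Python loop terminates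
def chefWhile (P i : Int) : Nat → Int × Int → Int × Int
  | 0, s => s
  | fuel+1, (sum, count) => if sum ≠ P then chefWhile P i fuel (sum + i, count + 1) else (sum, count)

def chefCount (P i : Int) : Int := (chefWhile P i (P.natAbs + 1) (0, 0)).2

def Chefs_pawn (P : Int) (N : List Int) : Int :=
  let Dis := N.foldl
    (fun (d : PySem.Dict Int Int) i =>
      if PySem.Int.mod P i = 0 then d.insert i (chefCount P i) else d)
    PySem.Dict.empty
  if Dis.size ≠ 0 then
    match PySem.List.min? Dis.keys (fun k => Dis.getD k 0) with
    | some m => m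
    | none => -1
  else -1

-- ===== PORT B =====
def Chefs_pawn_alt (P : Int) (N : List Int) : Int :=
  (N.foldl
    (fun (st : Int × Option Int) i =>
      if PySem.Int.mod P i = 0 then
        let q := PySem.Int.floordiv P i
        match st.2 with
        | none => (i, some q)
        | some bq => if q < bq then (i, some q) else st
      else st)
    ((-1 : Int), (none : Option Int))).1

-- ===== PRECONDITION & SPEC =====
-- Pre_ excludes exactly the inputs where Python A does not return: any 0 in N (ZeroDivisionError)
-- and any divisor of a nonzero P with non-positive quotient (the while loop never reaches P: divergence).
def Pre_Chefs_pawn (P : Int) (N : List Int) : Prop :=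
  ∀ i ∈ N, i ≠ 0 ∧ (PySem.Int.mod P i = 0 → 0 < PySem.Int.floordiv P i ∨ P = 0)
instance (P : Int) (N : List Int) : Decidable (Pre_Chefs_pawn P N) := by
  unfold Pre_Chefs_pawn; infer_instance

def pvWitness_Chefs_pawn : Int × List Int := (6, [4, 3, 5, 6])

def Spec_Chefs_pawn (P : Int) (N : List Int) (out : Int) : Prop := out = Chefs_pawn_alt P N
instance (P : Int) (N : List Int) (out : Int) : Decidable (Spec_Chefs_pawn P N out) := by
  unfold Spec_Chefs_pawn; infer_instance

-- ===== CLAIM (what is proved, stated in full; the proofs are below) =====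
def Claim_equal_Chefs_pawn : Prop :=
  ∀ (P : Int) (N : List Int), Dom_Chefs_pawn P N → Pre_Chefs_pawn P N →
    Spec_Chefs_pawn P N (Chefs_pawn P N)

-- ===== LEMMAS AND PROOFS =====

-- the fold step of PySem.List.min?
def minStep (key : Int → Int) (acc : Option Int) (x : Int) : Option Int :=
  match acc with
  | none => some x
  | some m => if key x < key m then some x else some m

theorem min?_eq_foldl (xs : List Int) (key : Int → Int) :
    PySem.List.min? xs key = xs.foldl (minStep key) none := by
  unfold PySem.List.min? minStep
  congr 1
  funext acc x
  cases acc <;> rfl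

theorem foldl_minStep_const (key : Int → Int) (ks : List Int) (m : Int)
    (h : ∀ k ∈ ks, key m ≤ key k) :
    ks.foldl (minStep key) (some m) = some m := by
  induction ks with
  | nil => rfl
  | cons a t ih =>
    have h1 : key m ≤ key a := h a (by simp)
    have : minStep key (some m) a = some m := by
      simp [minStep]; omega
    simp only [List.foldl_cons, this]
    exact ih (fun k hk => h k (by simp [hk]))

theorem foldl_minStep_mem (key : Int → Int) :
    ∀ (ks : List Int) (m m' : Int),
      ks.foldl (minStep key) (some m) = some m' → m' = m ∨ m' ∈ ks := by
  intro ks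
  induction ks with
  | nil =>
    intro m m' h
    simp at h
    exact Or.inl h.symm
  | cons a t ih =>
    intro m m' h
    simp only [List.foldl_cons, minStep] at h
    by_cases hc : key a < key m
    · simp [hc] at h
      rcases ih a m' h with h1 | h1
      · right; simp [h1]
      · right; simp [h1]
    · simp [hc] at h
      rcases ih m m' h with h1 | h1
      · left; exact h1
      · right; simp [h1]

theorem foldl_minStep_first (key : Int → Int) (pre : List Int) (bi : Int) (post : List Int)
    (hpre : ∀ k ∈ pre, key bi < key k) (hpost : ∀ k ∈ post, key bi ≤ key k) :
    (pre ++ bi :: post).foldl (minStep key) none = some bi := by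
  have hfirst : pre.foldl (minStep key) none = none ∨
      ∃ m0, pre.foldl (minStep key) none = some m0 ∧ key bi < key m0 := by
    cases hp : pre.foldl (minStep key) none with
    | none => exact Or.inl rfl
    | some m0 =>
      right
      refine ⟨m0, rfl, ?_⟩
      cases pre with
      | nil => simp at hp
      | cons a t =>
        simp only [List.foldl_cons, minStep] at hp
        rcases foldl_minStep_mem key t a m0 hp with h1 | h1
        · rw [h1]; exact hpre a (by simp)
        · exact hpre m0 (by simp [h1])
  rw [List.foldl_append]
  rcases hfirst with hp | ⟨m0, hp, hlt⟩
  · rw [hp]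
    show (bi :: post).foldl (minStep key) none = some bi
    simp only [List.foldl_cons, minStep]
    exact foldl_minStep_const key post bi hpost
  · rw [hp]
    simp only [List.foldl_cons, minStep]
    rw [if_pos hlt]
    exact foldl_minStep_const key post bi hpost

-- the while loop computes q = P // i when i ∣ P with positive quotient
theorem chefWhile_go (P i q : Int) (hi : i ≠ 0) (hqi : q * i = P) :
    ∀ (fuel : Nat) (c : Nat), (c : Int) ≤ q → q.toNat - c ≤ fuel →
      (chefWhile P i fuel ((c : Int) * i, (c : Int))).2 = q := by
  intro fuel
  induction fuel with
  | zero =>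
    intro c hc hf
    have hq0 : (0 : Int) ≤ q := le_trans (Int.natCast_nonneg c) hc
    have : (c : Int) = q := by omega
    simp [chefWhile, this]
  | succ f ih =>
    intro c hc hf
    by_cases hstop : (c : Int) * i = P
    · have : chefWhile P i (f + 1) ((c : Int) * i, (c : Int)) = ((c : Int) * i, (c : Int)) := by
        simp [chefWhile, hstop]
      rw [this]
      have : (c : Int) * i = q * i := by rw [hstop, hqi]
      exact mul_right_cancel₀ hi this
    · have hlt : (c : Int) < q := by
        rcases lt_or_eq_of_le hc with h | h
        · exact h
        · exact absurd (by rw [h, hqi]) hstop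
      have hstep : chefWhile P i (f + 1) ((c : Int) * i, (c : Int)) =
          chefWhile P i f ((c : Int) * i + i, (c : Int) + 1) := by
        simp [chefWhile, hstop]
      rw [hstep]
      have h1 : (c : Int) * i + i = ((c + 1 : Nat) : Int) * i := by push_cast; ring
      have h2 : (c : Int) + 1 = ((c + 1 : Nat) : Int) := by push_cast; ring
      rw [h1, h2]
      exact ih (c + 1) (by omega) (by omega)

theorem chefCount_eq (P i : Int) (hi : i ≠ 0)
    (hmod : PySem.Int.mod P i = 0) (hq : 0 < PySem.Int.floordiv P i ∨ P = 0) :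
    chefCount P i = PySem.Int.floordiv P i := by
  have hdm := PySem.Int.floordiv_mul_add_mod P i
  rw [hmod, add_zero] at hdm
  set q := PySem.Int.floordiv P i with hqdef
  rcases hq with hq | hq
  · -- positive quotient: the loop runs q times
    have hqabs : q.toNat ≤ P.natAbs + 1 := by
      have h1 : P.natAbs = q.natAbs * i.natAbs := by rw [← hdm, Int.natAbs_mul]
      have h2 : 1 ≤ i.natAbs := by omega
      have h3 : q.natAbs * 1 ≤ q.natAbs * i.natAbs := Nat.mul_le_mul_left _ h2
      omega
    have := chefWhile_go P i q hi hdm (P.natAbs + 1) 0 (by exact_mod_cast le_of_lt hq) (by omega)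
    simpa [chefCount] using this
  · -- P = 0: the loop exits immediately with count 0, and 0 // i = 0
    subst hq
    have hq0 : q = 0 := by
      rcases mul_eq_zero.mp hdm with h | h
      · exact h
      · exact absurd h hi
    simp [chefCount, chefWhile, hq0]

-- Dict re-insertion of the present value is a no-op
theorem insert_same_eq {d : PySem.Dict Int Int} {k v : Int}
    (hn : d.keys.Nodup) (hv : d.get? k = some v) : d.insert k v = d := by
  have hc : d.contains k = true := by
    rw [PySem.Dict.contains_eq_isSome_get?, hv]; rfl
  have hitems : (d.insert k v).items = d.items := by
    rw [PySem.Dict.items_insert_of_contains (h := hc)]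
    conv_rhs => rw [← List.map_id d.items]
    apply List.map_congr_left
    intro p hp
    obtain ⟨p1, p2⟩ := p
    by_cases hk : p1 = k
    · subst hk
      have h1 : d.get? p1 = some p2 := PySem.Dict.get?_of_mem_items d hp hn
      rw [hv] at h1
      simp at h1
      simp [h1]
    · simp [hk]
  cases hd : d.insert k v
  cases d
  simp_all

-- invariant linking A's dict to B's accumulator after the processed prefix
def ChefInv (P : Int) (d : PySem.Dict Int Int) (st : Int × Option Int) : Prop :=
  d.keys.Nodup ∧
  (∀ p ∈ d.items, PySem.Int.mod P p.1 = 0 ∧ p.2 = chefCount P p.1 ∧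
      p.2 = PySem.Int.floordiv P p.1) ∧
  (match st.2 with
   | none => d.items = [] ∧ st.1 = -1
   | some bq =>
       (∀ p ∈ d.items, bq ≤ p.2) ∧
       ∃ pre post, d.items = pre ++ (st.1, bq) :: post ∧ ∀ p ∈ pre, bq < p.2)

theorem chef_final (P : Int) (d : PySem.Dict Int Int) (st : Int × Option Int)
    (hinv : ChefInv P d st) :
    (if d.size ≠ 0 then
       match PySem.List.min? d.keys (fun k => d.getD k 0) with
       | some m => m
       | none => -1
     else -1) = st.1 := by
  obtain ⟨hn, hvals, hst⟩ := hinv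
  have hkeys : d.keys = d.items.map Prod.fst := by cases d; rfl
  have hsz : d.size = d.items.length := by cases d; rfl
  have hval : ∀ p ∈ d.items, d.getD p.1 0 = p.2 := by
    intro p hp
    obtain ⟨p1, p2⟩ := p
    exact PySem.Dict.getD_of_mem_items d hp hn 0
  cases hq : st.2 with
  | none =>
    rw [hq] at hst
    obtain ⟨hit, h1⟩ := hst
    simp [hsz, hit, h1]
  | some bq =>
    rw [hq] at hst
    obtain ⟨hle, pre, post, hdec, hprelt⟩ := hst
    have hne : d.size ≠ 0 := by
      rw [hsz, hdec]; simp
    rw [if_pos hne, min?_eq_foldl, hkeys, hdec]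
    simp only [List.map_append, List.map_cons]
    have hbi : d.getD st.1 0 = bq := hval (st.1, bq) (by rw [hdec]; simp)
    rw [foldl_minStep_first (fun k => d.getD k 0) (pre.map Prod.fst) st.1 (post.map Prod.fst)
      (by
        intro k hk
        obtain ⟨p, hp, rfl⟩ := List.mem_map.mp hk
        have hpd : p ∈ d.items := by rw [hdec]; simp [hp]
        show d.getD st.1 0 < d.getD p.1 0
        rw [hbi, hval p hpd]
        exact hprelt p hp)
      (by
        intro k hk
        obtain ⟨p, hp, rfl⟩ := List.mem_map.mp hk
        have hpd : p ∈ d.items := by rw [hdec]; simp [hp]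
        show d.getD st.1 0 ≤ d.getD p.1 0
        rw [hbi, hval p hpd]
        exact hle p hpd)]

theorem chef_main (P : Int) :
    ∀ (rest : List Int) (d : PySem.Dict Int Int) (st : Int × Option Int),
      (∀ i ∈ rest, i ≠ 0 ∧ (PySem.Int.mod P i = 0 → 0 < PySem.Int.floordiv P i ∨ P = 0)) →
      ChefInv P d st →
      (let Dis := rest.foldl
          (fun (d : PySem.Dict Int Int) i =>
            if PySem.Int.mod P i = 0 then d.insert i (chefCount P i) else d) d
       if Dis.size ≠ 0 then
         match PySem.List.min? Dis.keys (fun k => Dis.getD k 0) with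
         | some m => m
         | none => -1
       else -1) =
      (rest.foldl
        (fun (st : Int × Option Int) i =>
          if PySem.Int.mod P i = 0 then
            let q := PySem.Int.floordiv P i
            match st.2 with
            | none => (i, some q)
            | some bq => if q < bq then (i, some q) else st
          else st) st).1 := by
  intro rest
  induction rest with
  | nil =>
    intro d st hpre hinv
    simpa using chef_final P d st hinv
  | cons i rest ih =>
    intro d st hpre hinv
    obtain ⟨hi0, hqpos⟩ := hpre i (by simp)
    have hpre' : ∀ j ∈ rest, j ≠ 0 ∧ (PySem.Int.mod P j = 0 → 0 < PySem.Int.floordiv P j ∨ P = 0) :=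
      fun j hj => hpre j (by simp [hj])
    simp only [List.foldl_cons]
    by_cases hm : PySem.Int.mod P i = 0
    · have hcc : chefCount P i = PySem.Int.floordiv P i := chefCount_eq P i hi0 hm (hqpos hm)
      obtain ⟨hn, hvals, hst⟩ := hinv
      obtain ⟨b1, bo⟩ := st
      rw [if_pos hm, if_pos hm]
      cases bo with
      | none =>
        simp only at hst
        obtain ⟨hit, hb1⟩ := hst
        have hkeys2 : d.keys = d.items.map Prod.fst := by cases d; rfl
        have hcont : d.contains i = false := by
          have hnc : ¬ (d.contains i = true) := by
            intro h
            have hmem := (PySem.Dict.contains_iff_mem_keys (d := d) (k := i)).mp h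
            rw [hkeys2, hit] at hmem
            simp at hmem
          simpa using hnc
        have hitems' : (d.insert i (chefCount P i)).items = [(i, chefCount P i)] := by
          rw [PySem.Dict.items_insert_of_not_contains d _ hcont, hit]
          simp
        refine (ih _ ((i : Int), some (PySem.Int.floordiv P i)) hpre' ?_).trans (by simp)
        refine ⟨PySem.Dict.nodup_keys_insert _ _ _ hn, ?_, ?_⟩
        · intro p hp
          rw [hitems'] at hp
          simp at hp
          subst hp
          exact ⟨hm, rfl, hcc⟩
        · show (∀ p ∈ _, _) ∧ _
          refine ⟨?_, [], [], ?_, ?_⟩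
          · intro p hp
            rw [hitems'] at hp
            simp at hp
            subst hp
            simp [hcc]
          · rw [hitems', hcc]
            simp
          · intro p hp
            simp at hp
      | some bq =>
        simp only at hst
        obtain ⟨hle, pre, post, hdec, hprelt⟩ := hst
        by_cases hcont : d.contains i = true
        · -- duplicate divisor: A's dict and B's accumulator are both unchanged
          obtain ⟨vi, hvi⟩ : ∃ vi, d.get? i = some vi := by
            have hiso := PySem.Dict.contains_eq_isSome_get? (d := d) (k := i)
            rw [hcont] at hiso
            cases hgi : d.get? i with
            | none => rw [hgi] at hiso; simp at hiso
            | some v => exact ⟨v, rfl⟩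
          have hmemi : (i, vi) ∈ d.items := PySem.Dict.mem_items_of_get?_eq_some d hvi
          have hvic : vi = chefCount P i := (hvals (i, vi) hmemi).2.1
          have hdd : d.insert i (chefCount P i) = d := by
            apply insert_same_eq hn
            rw [hvi, hvic]
          have hnotlt : ¬ PySem.Int.floordiv P i < bq := by
            have h1 : bq ≤ vi := hle (i, vi) hmemi
            have h2 : vi = PySem.Int.floordiv P i := (hvals (i, vi) hmemi).2.2
            omega
          rw [hdd]
          exact (ih d (b1, some bq) hpre'
            ⟨hn, hvals, hle, pre, post, hdec, hprelt⟩).trans (by simp [hnotlt])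
        · -- new divisor: appended to the dict, compared against the running best
          have hcont' : d.contains i = false := by simpa using hcont
          have hitems' : (d.insert i (chefCount P i)).items = d.items ++ [(i, chefCount P i)] :=
            PySem.Dict.items_insert_of_not_contains d _ hcont'
          have hn' : (d.insert i (chefCount P i)).keys.Nodup := PySem.Dict.nodup_keys_insert _ _ _ hn
          have hvals' : ∀ p ∈ (d.insert i (chefCount P i)).items,
              PySem.Int.mod P p.1 = 0 ∧ p.2 = chefCount P p.1 ∧ p.2 = PySem.Int.floordiv P p.1 := by
            intro p hp
            rw [hitems'] at hp
            rcases List.mem_append.mp hp with h | h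
            · exact hvals p h
            · simp at h
              subst h
              exact ⟨hm, rfl, hcc⟩
          by_cases hlt : PySem.Int.floordiv P i < bq
          · refine (ih _ ((i : Int), some (PySem.Int.floordiv P i)) hpre' ?_).trans (by simp [hlt])
            refine ⟨hn', hvals', ?_⟩
            show (∀ p ∈ _, _) ∧ _
            refine ⟨?_, d.items, [], by rw [hitems', hcc], ?_⟩
            · intro p hp
              rcases List.mem_append.mp (hitems' ▸ hp) with h | h
              · have := hle p h
                omega
              · simp at h
                subst h
                simp [hcc]
            · intro p hp
              have := hle p hp
              omega
          · refine (ih _ (b1, some bq) hpre' ?_).trans (by simp [hlt])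
            refine ⟨hn', hvals', ?_⟩
            show (∀ p ∈ _, _) ∧ _
            refine ⟨?_, pre, post ++ [(i, chefCount P i)], ?_, hprelt⟩
            · intro p hp
              rcases List.mem_append.mp (hitems' ▸ hp) with h | h
              · exact hle p h
              · simp at h
                subst h
                simp only [hcc]
                omega
            · rw [hitems', hdec]
              simp
    · rw [if_neg hm, if_neg hm]
      exact ih _ _ hpre' ⟨hinv.1, hinv.2.1, hinv.2.2⟩

-- ===== VERDICT (by name: the statement is the Claim_ definition above) =====
theorem Chefs_pawn_spec : Claim_equal_Chefs_pawn := by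
  intro P N _ hpre
  unfold Spec_Chefs_pawn Chefs_pawn Chefs_pawn_alt
  apply chef_main P N PySem.Dict.empty ((-1 : Int), (none : Option Int)) hpre
  refine ⟨?_, ?_, ?_⟩
  · show (PySem.Dict.empty : PySem.Dict Int Int).keys.Nodup
    exact List.nodup_nil
  · intro p hp
    exact absurd hp (List.not_mem_nil)
  · exact ⟨rfl, rfl⟩
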